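-- pv_equiv track=rewrite | github.com/mekhub/alphafold | alphafold/partition_helpers.py | initialize_any_cutpoint
-- ===== SOURCE A (Python) =====
-- def initialize_zero_matrix( N ):
--     X = []
--     for i in range( N ):
--         X.append( [] )
--         for j in range( N ): X[i].append( 0.0 )
--     return X
--
-- def initialize_any_cutpoint( is_cutpoint ):
--     N = len( is_cutpoint )
--     any_cutpoint = initialize_zero_matrix( N )
--     for i in range( N ): #index of subfragment
--         found_cutpoint = False
--         any_cutpoint[ i ][ i ] = False
--         for offset in range( N ): #length of subfragment
--             j = (i + offset) % N;  # N cyclizes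
--             any_cutpoint[ i ][ j ] = found_cutpoint
--             if is_cutpoint[ j ]: found_cutpoint = True
--     return any_cutpoint
-- ===== SOURCE B (Python) =====
-- def initialize_any_cutpoint(is_cutpoint):
--     N = len(is_cutpoint)
--     P = [0]
--     run = 0
--     for v in is_cutpoint:
--         run += 1 if v else 0
--         P.append(run)
--     total = P[N]
--     return [[(P[j] - P[i] if j >= i else total - P[i] + P[j]) > 0
--              for j in range(N)]
--             for i in range(N)]
-- ===== Notes on version B (the rewrite author's own statement) =====
-- stated objective: simpler
-- what changed: A fills each row with a sequential running found-cutpoint flag walking cyclic offsets; B precomputes a prefix-count array once and fills every cell by a direct arithmetic comparison on cyclic interval counts, with no loop-carried state.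
import Mathlib
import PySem

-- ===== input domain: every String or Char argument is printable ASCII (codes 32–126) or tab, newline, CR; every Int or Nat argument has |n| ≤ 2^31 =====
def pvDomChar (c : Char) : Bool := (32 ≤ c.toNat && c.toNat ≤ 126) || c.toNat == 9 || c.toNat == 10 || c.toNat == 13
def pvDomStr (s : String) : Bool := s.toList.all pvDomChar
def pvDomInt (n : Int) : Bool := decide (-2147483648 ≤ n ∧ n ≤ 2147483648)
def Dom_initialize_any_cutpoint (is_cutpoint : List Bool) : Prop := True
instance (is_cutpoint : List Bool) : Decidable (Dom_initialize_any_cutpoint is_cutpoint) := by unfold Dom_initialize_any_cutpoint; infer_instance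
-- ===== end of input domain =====

-- B replaces A's per-row running cutpoint flag by a prefix-count table with direct
-- arithmetic lookups per cell (objective: simpler; same O(N^2) cost, the output size).

-- ===== PORT A =====
-- Python fills the matrix with 0.0 placeholders; every cell is overwritten with a Bool
-- before the matrix is returned (the inner loop visits every column), so the
-- placeholder is typed as 'false' here.
def initialize_zero_matrix (N : Nat) : List (List Bool) :=
  (List.range N).foldl (fun X _ =>
    X ++ [(List.range N).foldl (fun r _ => r ++ [false]) []]) []

-- inner-loop body of A: j = (i+offset) % N; any_cutpoint[i][j] = found; update found.
-- is_cutpoint[j] is in range (0 ≤ j < N), so getD is exact.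
def pvAInner (is_cutpoint : List Bool) (N i : Nat)
    (st : Bool × List (List Bool)) (offset : Nat) : Bool × List (List Bool) :=
  let j := (i + offset) % N
  let mat := st.2.modify i (fun row => row.set j st.1)
  let found := if is_cutpoint.getD j false then true else st.1
  (found, mat)

def initialize_any_cutpoint (is_cutpoint : List Bool) : List (List Bool) :=
  let N := is_cutpoint.length
  (List.range N).foldl (fun mat i =>
      ((List.range N).foldl (pvAInner is_cutpoint N i)
        (false, mat.modify i (fun row => row.set i false))).2)
    (initialize_zero_matrix N)

-- ===== PORT B =====
-- loop body of Source B building the prefix-count list: run += 1 if v else 0; P.append(run)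
def pvPrefStep (st : List Int × Int) (v : Bool) : List Int × Int :=
  let run := st.2 + (if v then 1 else 0)
  (st.1 ++ [run], run)

def initialize_any_cutpoint_alt (is_cutpoint : List Bool) : List (List Bool) :=
  let N := is_cutpoint.length
  let P := (is_cutpoint.foldl pvPrefStep ([0], 0)).1
  let total := P.getD N 0
  (List.range N).map (fun i => (List.range N).map (fun j =>
    decide (0 < if i ≤ j then P.getD j 0 - P.getD i 0
                else total - P.getD i 0 + P.getD j 0)))

-- ===== PRECONDITION & SPEC =====
def Spec_initialize_any_cutpoint (is_cutpoint : List Bool) (out : List (List Bool)) : Prop := out = initialize_any_cutpoint_alt is_cutpoint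
instance (is_cutpoint : List Bool) (out : List (List Bool)) : Decidable (Spec_initialize_any_cutpoint is_cutpoint out) := by unfold Spec_initialize_any_cutpoint; infer_instance

-- ===== CLAIM (what is proved, stated in full; the proofs are below) =====
def Claim_equal_initialize_any_cutpoint : Prop := ∀ (is_cutpoint : List Bool), Dom_initialize_any_cutpoint is_cutpoint → Spec_initialize_any_cutpoint is_cutpoint (initialize_any_cutpoint is_cutpoint)

-- ===== LEMMAS AND PROOFS =====

-- number of true entries among the first k cells
def pvCnt (cut : List Bool) (k : Nat) : Nat := (cut.take k).count true

-- number of true entries among the cyclic window of length t starting at i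
def pvCyc (cut : List Bool) (i t : Nat) : Nat :=
  (List.range t).countP (fun s => cut.getD ((i + s) % cut.length) false)

-- the offset at which A's row-i loop visits column j
def pvOff (N i j : Nat) : Nat := if i ≤ j then j - i else N + j - i

-- A's inner loop restricted to the single row it touches
def pvStepR (cut : List Bool) (N i : Nat) (st : Bool × List Bool) (o : Nat) : Bool × List Bool :=
  (if cut.getD ((i + o) % N) false then true else st.1, st.2.set ((i + o) % N) st.1)

-- the row A ends up with, phrased through pvCyc
def pvRowT (cut : List Bool) (i : Nat) : List Bool :=
  (List.range cut.length).map (fun j => decide (0 < pvCyc cut i (pvOff cut.length i j)))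

theorem pv_modify_modify {α : Type} (m : List α) (i : Nat) (f g : α → α) :
    (m.modify i f).modify i g = m.modify i (fun r => g (f r)) := by
  apply List.ext_getElem?
  intro j
  simp only [List.getElem?_modify]
  cases m[j]? <;> simp <;> split <;> simp

theorem pv_repl_fold {α : Type} (n : Nat) (acc : List α) (x : α) :
    (List.range n).foldl (fun r _ => r ++ [x]) acc = acc ++ List.replicate n x := by
  induction n generalizing acc with
  | zero => simp
  | succ n ih =>
      rw [List.range_succ, List.foldl_append]
      simp [ih, List.replicate_succ']

theorem pv_zeroMat (N : Nat) :
    initialize_zero_matrix N = List.replicate N (List.replicate N false) := by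
  unfold initialize_zero_matrix
  simp only [pv_repl_fold]
  simp

theorem pv_cnt_zero (cut : List Bool) : pvCnt cut 0 = 0 := by simp [pvCnt]

theorem pv_cnt_succ (cut : List Bool) (k : Nat) (h : k < cut.length) :
    pvCnt cut (k+1) = pvCnt cut k + (if cut.getD k false then 1 else 0) := by
  have hg : cut[k]? = some cut[k] := List.getElem?_eq_getElem h
  simp only [pvCnt, List.take_add_one, hg, List.count_append,
    List.getD_eq_getElem?_getD, Option.toList_some]
  cases hb : cut[k] <;> simp [List.count_cons]

theorem pv_cnt_mono (cut : List Bool) (a b : Nat) (h : a ≤ b) :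
    pvCnt cut a ≤ pvCnt cut b := by
  have h1 : cut.take a = (cut.take b).take a := by
    rw [List.take_take, Nat.min_eq_left h]
  unfold pvCnt
  rw [h1]
  exact ((List.take_prefix a (cut.take b)).sublist).count_le true

theorem pv_P_build (l : List Bool) (acc : List Int) (run : Int) :
    (l.foldl pvPrefStep (acc, run)).1
      = acc ++ (List.range l.length).map (fun t => run + ((l.take (t+1)).count true : Int)) := by
  induction l generalizing acc run with
  | nil => simp
  | cons v l ih =>
      simp only [List.foldl_cons, pvPrefStep, ih, List.length_cons, List.range_succ_eq_map,
        List.map_cons, List.map_map]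
      rw [List.append_assoc]
      congr 1
      simp only [List.singleton_append]
      congr 1
      · cases v <;> simp
      · apply List.map_congr_left
        intro t _
        simp only [Function.comp, Nat.succ_eq_add_one, List.take_succ_cons, List.count_cons]
        cases v <;> simp <;> push_cast <;> ring

theorem pv_P_getD (cut : List Bool) (k : Nat) (h : k ≤ cut.length) :
    ((cut.foldl pvPrefStep ([0], 0)).1).getD k 0 = (pvCnt cut k : Int) := by
  rw [pv_P_build]
  match k with
  | 0 => simp [pvCnt]
  | (k+1) =>
      have hk : k < cut.length := by omega
      simp only [List.getD_eq_getElem?_getD]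
      rw [List.getElem?_append_right (by simp)]
      simp [hk, pvCnt]

theorem pv_mod_split (N i t : Nat) (hi : i < N) (ht : t < N) :
    (i + t) % N = if i + t < N then i + t else i + t - N := by
  split
  · exact Nat.mod_eq_of_lt (by omega)
  · rw [Nat.mod_eq_sub_mod (by omega)]
    exact Nat.mod_eq_of_lt (by omega)

theorem pv_cyc_succ (cut : List Bool) (i t : Nat) :
    pvCyc cut i (t+1)
      = pvCyc cut i t + (if cut.getD ((i + t) % cut.length) false then 1 else 0) := by
  simp only [pvCyc, List.range_succ, List.countP_append, List.countP_cons, List.countP_nil]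
  split <;> simp_all

theorem pv_bridge (cut : List Bool) (i t : Nat) (hi : i < cut.length) (ht : t ≤ cut.length) :
    pvCyc cut i t
      = if i + t ≤ cut.length then pvCnt cut (i+t) - pvCnt cut i
        else pvCnt cut cut.length - pvCnt cut i + pvCnt cut (i + t - cut.length) := by
  induction t with
  | zero =>
      simp [pvCyc, Nat.le_of_lt hi]
  | succ t ih =>
      have ht' : t < cut.length := by omega
      rw [pv_cyc_succ, ih (by omega)]
      have hmono1 : pvCnt cut i ≤ pvCnt cut (i+t) := pv_cnt_mono _ _ _ (by omega)
      have hmonoN : pvCnt cut i ≤ pvCnt cut cut.length := pv_cnt_mono _ _ _ (by omega)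
      rw [show i + (t+1) = i + t + 1 from rfl]
      by_cases hc : i + t < cut.length
      · have hidx : (i + t) % cut.length = i + t := Nat.mod_eq_of_lt hc
        rw [hidx, if_pos (by omega : i + t ≤ cut.length),
          if_pos (by omega : i + t + 1 ≤ cut.length), pv_cnt_succ cut (i+t) hc]
        split <;> omega
      · have hidx : (i + t) % cut.length = i + t - cut.length := by
          rw [pv_mod_split _ _ _ hi ht']; simp [hc]
        have hj : i + t - cut.length < cut.length := by omega
        have hz : pvCnt cut 0 = 0 := pv_cnt_zero cut
        have hmono2 : pvCnt cut (i + t - cut.length) ≤ pvCnt cut cut.length :=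
          pv_cnt_mono _ _ _ (by omega)
        rw [hidx, if_neg (by omega : ¬ i + t + 1 ≤ cut.length),
          show i + t + 1 - cut.length = (i + t - cut.length) + 1 by omega,
          pv_cnt_succ cut (i + t - cut.length) hj]
        by_cases he : i + t ≤ cut.length
        · have h0 : i + t - cut.length = 0 := by omega
          rw [if_pos he, h0, hz, show i + t = cut.length by omega]
          split <;> omega
        · rw [if_neg he]
          split <;> omega

theorem pv_inner_snd (cut : List Bool) (N i : Nat) (l : List Nat) (b : Bool)
    (m : List (List Bool)) :
    (l.foldl (pvAInner cut N i) (b, m)).2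
      = m.modify i (fun row => (l.foldl (pvStepR cut N i) (b, row)).2) := by
  induction l generalizing b m with
  | nil =>
      simp only [List.foldl_nil]
      exact (List.modify_id (l := m) (i := i)).symm
  | cons o l ih =>
      simp only [List.foldl_cons, pvAInner, pvStepR]
      rw [ih, pv_modify_modify]

theorem pv_off_lt (N i j : Nat) (hi : i < N) (hj : j < N) : pvOff N i j < N := by
  unfold pvOff; split <;> omega

theorem pv_off_eq (N i j t : Nat) (hi : i < N) (hj : j < N) (ht : t < N) :
    (i + t) % N = j ↔ pvOff N i j = t := by
  rw [pv_mod_split _ _ _ hi ht]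
  unfold pvOff
  split <;> split <;> omega

theorem pv_row_inv (cut : List Bool) (i : Nat) (hi : i < cut.length)
    (t : Nat) (ht : t ≤ cut.length) (r0 : List Bool) (hr : r0.length = cut.length) :
    ((List.range t).foldl (pvStepR cut cut.length i) (false, r0)).1
        = decide (0 < pvCyc cut i t)
    ∧ ((List.range t).foldl (pvStepR cut cut.length i) (false, r0)).2.length = cut.length
    ∧ ∀ j, j < cut.length →
        ((List.range t).foldl (pvStepR cut cut.length i) (false, r0)).2[j]?
          = if pvOff cut.length i j < t
            then some (decide (0 < pvCyc cut i (pvOff cut.length i j)))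
            else r0[j]? := by
  induction t with
  | zero =>
      refine ⟨by simp [pvCyc], by simpa using hr, ?_⟩
      intro j hj
      simp
  | succ t ih =>
      have ht' : t < cut.length := by omega
      obtain ⟨ih1, ih2, ih3⟩ := ih (by omega)
      have hN : 0 < cut.length := by omega
      have hjt : (i + t) % cut.length < cut.length := Nat.mod_lt _ hN
      simp only [List.range_succ, List.foldl_append, List.foldl_cons, List.foldl_nil]
      refine ⟨?_, ?_, ?_⟩
      · simp only [pvStepR]
        rw [ih1, pv_cyc_succ]
        cases hb : cut.getD ((i + t) % cut.length) false <;> simp [hb]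
      · simp only [pvStepR]
        rw [List.length_set]
        exact ih2
      · intro j hj
        simp only [pvStepR]
        rw [List.getElem?_set]
        by_cases hje : (i + t) % cut.length = j
        · have hofft : pvOff cut.length i j = t := (pv_off_eq _ _ _ _ hi hj ht').mp hje
          have hlen : (i + t) % cut.length <
              ((List.range t).foldl (pvStepR cut cut.length i) (false, r0)).2.length := by
            rw [ih2]; exact hjt
          rw [if_pos hje, if_pos hlen, hofft, if_pos (by omega), ih1]
        · have hne : pvOff cut.length i j ≠ t :=
            fun h => hje ((pv_off_eq _ _ _ _ hi hj ht').mpr h)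
          rw [if_neg hje, ih3 j hj]
          by_cases hlt : pvOff cut.length i j < t
          · rw [if_pos hlt, if_pos (by omega)]
          · rw [if_neg hlt, if_neg (by omega)]

theorem pv_row_final (cut : List Bool) (i : Nat) (hi : i < cut.length)
    (r0 : List Bool) (hr : r0.length = cut.length) :
    ((List.range cut.length).foldl (pvStepR cut cut.length i) (false, r0)).2
      = pvRowT cut i := by
  obtain ⟨-, h2, h3⟩ := pv_row_inv cut i hi cut.length le_rfl r0 hr
  apply List.ext_getElem?
  intro j
  by_cases hj : j < cut.length
  · rw [h3 j hj, if_pos (pv_off_lt _ _ _ hi hj)]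
    simp [pvRowT, hj]
  · rw [List.getElem?_eq_none (by rw [h2]; omega)]
    simp [pvRowT, Nat.le_of_not_lt hj]

theorem pv_outer (cut : List Bool) (k : Nat) (hk : k ≤ cut.length) :
    ((List.range k).foldl (fun mat i =>
        ((List.range cut.length).foldl (pvAInner cut cut.length i)
          (false, mat.modify i (fun row => row.set i false))).2)
      (List.replicate cut.length (List.replicate cut.length false))).length = cut.length
    ∧ ∀ i', i' < cut.length →
      ((List.range k).foldl (fun mat i =>
          ((List.range cut.length).foldl (pvAInner cut cut.length i)
            (false, mat.modify i (fun row => row.set i false))).2)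
        (List.replicate cut.length (List.replicate cut.length false)))[i']?
        = some (if i' < k then pvRowT cut i' else List.replicate cut.length false) := by
  induction k with
  | zero =>
      refine ⟨by simp, ?_⟩
      intro i' hi'
      simp [hi']
  | succ k ih =>
      have hk' : k < cut.length := by omega
      obtain ⟨ih1, ih2⟩ := ih (by omega)
      simp only [List.range_succ, List.foldl_append, List.foldl_cons, List.foldl_nil]
      rw [pv_inner_snd, pv_modify_modify]
      refine ⟨by rw [List.length_modify]; exact ih1, ?_⟩
      intro i' hi'
      rw [List.getElem?_modify, ih2 i' hi']
      simp only [Option.map_eq_map, Option.map_some]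
      by_cases hke : k = i'
      · subst hke
        rw [if_pos rfl, if_neg (by omega), if_pos (by omega)]
        congr 1
        exact pv_row_final cut k hk' _ (by simp)
      · rw [if_neg hke]
        by_cases hlt : i' < k
        · rw [if_pos hlt, if_pos (by omega)]
        · rw [if_neg hlt, if_neg (by omega)]

theorem pv_B_eval (cut : List Bool) :
    initialize_any_cutpoint_alt cut = (List.range cut.length).map (pvRowT cut) := by
  simp only [initialize_any_cutpoint_alt]
  apply List.map_congr_left
  intro i hi
  rw [List.mem_range] at hi
  unfold pvRowT
  apply List.map_congr_left
  intro j hj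
  rw [List.mem_range] at hj
  have hoff : pvOff cut.length i j < cut.length := pv_off_lt _ _ _ hi hj
  rw [pv_P_getD cut j (by omega), pv_P_getD cut i (by omega),
    pv_P_getD cut cut.length le_rfl,
    pv_bridge cut i (pvOff cut.length i j) hi (by omega), decide_eq_decide]
  have m1 : pvCnt cut i ≤ pvCnt cut cut.length := pv_cnt_mono _ _ _ (by omega)
  unfold pvOff
  by_cases hij : i ≤ j
  · have := pv_cnt_mono cut i j hij
    rw [if_pos hij, if_pos hij, show i + (j - i) = j by omega, if_pos (by omega)]
    omega
  · rw [if_neg hij, if_neg hij, show i + (cut.length + j - i) = cut.length + j by omega]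
    by_cases hcase : cut.length + j ≤ cut.length
    · have hj0 : j = 0 := by omega
      subst hj0
      rw [if_pos hcase, show cut.length + 0 = cut.length from rfl]
      have hz : pvCnt cut 0 = 0 := pv_cnt_zero cut
      omega
    · rw [if_neg hcase, show cut.length + j - cut.length = j by omega]
      omega

-- ===== VERDICT (by name: the statement is the Claim_ definition above) =====
theorem initialize_any_cutpoint_spec : Claim_equal_initialize_any_cutpoint := by
  intro cut _
  unfold Spec_initialize_any_cutpoint
  rw [pv_B_eval]
  simp only [initialize_any_cutpoint]
  rw [pv_zeroMat]
  obtain ⟨h1, h2⟩ := pv_outer cut cut.length le_rfl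
  apply List.ext_getElem?
  intro i'
  by_cases hi' : i' < cut.length
  · rw [h2 i' hi', if_pos hi']
    simp [hi']
  · rw [List.getElem?_eq_none (by rw [h1]; omega)]
    simp [Nat.le_of_not_lt hi']
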